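-- pv_equiv track=rewrite | github.com/sungminoh/algorithms | others/poj_brackets.py | find_maximum_regular_brackets
-- ===== SOURCE A (Python) =====
-- from functools import lru_cache
--
-- def find_maximum_regular_brackets(s):
--     matches = {'[]', '()'}
--     @lru_cache()
--     def _rec(i, j):
--         if i > j-2:
--             return 0
--         elif i == j-2:
--             if s[i:j] in matches:
--                 return 2
--             else:
--                 return 0
--         else:
--             m = max(_rec(i, k) + _rec(k, j) for k in range(i+1, j))
--             if s[i] + s[j-1] in matches:
--                 m = max(m, 2 + _rec(i+1, j-1))
--         return m
--     return _rec(0, len(s))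
-- ===== SOURCE B (Python) =====
-- def find_maximum_regular_brackets(s):
--     matches = {'[]', '()'}
--     n = len(s)
--     dp = {}
--     for length in range(2, n + 1):
--         for i in range(n - length + 1):
--             j = i + length
--             best = 0
--             for k in range(i + 1, j):
--                 best = max(best, dp.get((i, k), 0) + dp.get((k, j), 0))
--             if s[i] + s[j - 1] in matches:
--                 best = max(best, 2 + dp.get((i + 1, j - 1), 0))
--             dp[(i, j)] = best
--     return dp.get((0, n), 0)
-- ===== Notes on version B (the rewrite author's own statement) =====
-- stated objective: faster
-- what changed: Replaced the memoized top-down interval recursion (whose lru_cache() is capped at 128 entries, causing recomputation blow-up on longer strings) with a bottom-up interval-DP dictionary filled by increasing interval length and read off at (0, len(s)); intended as faster — a timing run measured B 4.24x at n=16 and A timed out at n=64 where B returned, but could not confirm a ratio at the largest size both finish.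
import Mathlib
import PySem

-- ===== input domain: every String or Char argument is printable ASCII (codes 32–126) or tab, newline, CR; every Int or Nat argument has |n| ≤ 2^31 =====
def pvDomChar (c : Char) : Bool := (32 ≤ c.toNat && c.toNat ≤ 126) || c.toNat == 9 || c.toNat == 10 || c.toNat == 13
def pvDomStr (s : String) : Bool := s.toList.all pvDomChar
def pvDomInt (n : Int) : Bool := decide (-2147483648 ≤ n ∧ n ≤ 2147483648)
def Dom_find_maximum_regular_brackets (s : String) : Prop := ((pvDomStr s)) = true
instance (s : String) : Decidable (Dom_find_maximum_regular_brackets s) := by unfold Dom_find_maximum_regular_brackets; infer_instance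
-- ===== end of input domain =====

-- B replaces A's memoized top-down recursion (whose lru_cache() is capped at 128 entries, so A
-- recomputes intervals on longer strings) by a bottom-up interval-DP table filled by increasing
-- interval length; intended as faster (timing: B 4.24x at n=16, A timed out at n=64 where
-- B returned; too small for the probe to confirm a ratio at the largest size both finish).

-- ===== PORT A =====
-- matches = {'[]', '()'}  (a set of strings; only membership is used)
def pvMatches : List String := ["[]", "()"]

-- 's[i] + s[j-1]' — both Pythons build this exact two-character string (shared helper).
-- The '.getD ' '' default is never used on reachable arguments (0 ≤ i < j-1 < len(s) there).
def pvPairStr (s : String) (i j : Nat) : String :=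
  String.ofList [(PySem.Str.pyGet? s (i : Int)).getD ' ',
                 (PySem.Str.pyGet? s ((j : Int) - 1)).getD ' ']

-- _rec(i, j): lru_cache only memoizes (same values); ported as plain recursion on j - i.
-- All reachable arguments have 0 ≤ i ≤ j ≤ len(s), so i, j are carried as Nat;
-- range(i+1, j) is List.range' (i+1) (j-(i+1)); Python's max over the nonempty generator
-- is the head/foldl-max over the same list of terms (the [] branch is unreachable there).
def pvARec (s : String) (i j : Nat) : Int :=
  if i + 2 > j then 0
  else if i + 2 = j then
    if PySem.Str.slice s (some (i : Int)) (some (j : Int)) ∈ pvMatches then 2 else 0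
  else
    let terms := ((List.range' (i+1) (j - (i+1))).attach).map
      (fun k => pvARec s i k.1 + pvARec s k.1 j)
    let m := match terms with | [] => 0 | t :: ts => ts.foldl max t
    if pvPairStr s i j ∈ pvMatches then max m (2 + pvARec s (i+1) (j-1)) else m
termination_by j - i
decreasing_by
  · have h := List.mem_range'_1.mp k.2; omega
  · have h := List.mem_range'_1.mp k.2; omega
  · omega

def find_maximum_regular_brackets (s : String) : Int :=
  pvARec s 0 s.toList.length

-- ===== PORT B =====
def pvMatchesAlt : List String := ["[]", "()"]

-- body of B's inner loop: best over split points, then the matching-pair case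
def pvDpStep (s : String) (dp : PySem.Dict (Nat × Nat) Int) (i j : Nat) : Int :=
  let best := (List.range' (i+1) (j - (i+1))).foldl
    (fun best k => max best (dp.getD (i, k) 0 + dp.getD (k, j) 0)) 0
  if pvPairStr s i j ∈ pvMatchesAlt then max best (2 + dp.getD (i+1, j-1) 0) else best

def find_maximum_regular_brackets_alt (s : String) : Int :=
  let n := s.toList.length
  let dp := (List.range' 2 (n - 1)).foldl
    (fun dp len => (List.range' 0 (n - len + 1)).foldl
      (fun dp i => dp.insert (i, i + len) (pvDpStep s dp i (i + len))) dp)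
    PySem.Dict.empty
  dp.getD (0, n) 0

-- ===== PRECONDITION & SPEC =====
def Spec_find_maximum_regular_brackets (s : String) (out : Int) : Prop := out = find_maximum_regular_brackets_alt s
instance (s : String) (out : Int) : Decidable (Spec_find_maximum_regular_brackets s out) := by unfold Spec_find_maximum_regular_brackets; infer_instance

-- ===== CLAIM (what is proved, stated in full; the proofs are below) =====
def Claim_equal_find_maximum_regular_brackets : Prop := ∀ (s : String), Dom_find_maximum_regular_brackets s → Spec_find_maximum_regular_brackets s (find_maximum_regular_brackets s)

-- ===== LEMMAS AND PROOFS =====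

theorem pvARec_nonneg_aux (s : String) : ∀ (n : Nat), ∀ i j : Nat, j - i ≤ n → 0 ≤ pvARec s i j := by
  intro n
  induction n with
  | zero =>
    intro i j h
    rw [pvARec, if_pos (by omega : i + 2 > j)]
  | succ n ih =>
    intro i j h
    rw [pvARec]
    by_cases h1 : i + 2 > j
    · rw [if_pos h1]
    · rw [if_neg h1]
      by_cases h2 : i + 2 = j
      · rw [if_pos h2]; split_ifs <;> norm_num
      · rw [if_neg h2]
        rw [List.attach_map_val (f := fun k => pvARec s i k + pvARec s k j)]
        obtain ⟨m', hm'⟩ : ∃ m', j - (i+1) = m' + 1 := ⟨j - i - 2, by omega⟩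
        rw [hm', List.range'_succ]
        simp only [List.map_cons]
        have h0 : 0 ≤ pvARec s i (i+1) + pvARec s (i+1) j := by
          have := ih i (i+1) (by omega)
          have := ih (i+1) j (by omega)
          omega
        have hm := (PySem.List.le_foldl_max
          ((List.range' (i+1+1) m').map (fun k => pvARec s i k + pvARec s k j))
          (pvARec s i (i+1) + pvARec s (i+1) j)).1
        split_ifs
        · exact le_trans (le_trans h0 hm) (le_max_left _ _)
        · exact le_trans h0 hm

theorem pvSlice_pair (s : String) (i : Nat) (h : i + 2 ≤ s.toList.length) :
    PySem.Str.slice s (some (i : Int)) (some ((i + 2 : Nat) : Int)) = pvPairStr s i (i + 2) := by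
  apply String.toList_inj.mp
  rw [PySem.Str.toList_slice]
  have h1 : i < s.toList.length := by omega
  have h2 : i + 1 < s.toList.length := by omega
  rw [pvPairStr]
  simp only [pysem, PySem.Chars.slice_eq_listSlice, PySem.List.slice_natCast]
  rw [show (((i + 2 : Nat) : Int) - 1) = ((i + 1 : Nat) : Int) by push_cast; ring]
  rw [List.drop_eq_getElem_cons h1, List.drop_eq_getElem_cons h2, show i + 2 - i = 2 by omega]
  simp only [String.toList_ofList]
  rw [List.getElem?_eq_getElem h1, PySem.List.pyGet?_natCast, List.getElem?_eq_getElem h2]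
  rfl

theorem pvARec_nonneg (s : String) (i j : Nat) : 0 ≤ pvARec s i j :=
  pvARec_nonneg_aux s (j - i) i j le_rfl

theorem pvStep_correct' (s : String) (dp : PySem.Dict (Nat × Nat) Int) (i L : Nat)
    (hL : 2 ≤ L) (hn : i + L ≤ s.toList.length)
    (hinv : ∀ a b : Nat, b ≤ s.toList.length → b - a ≤ L - 1 → dp.getD (a, b) 0 = pvARec s a b) :
    pvDpStep s dp i (i + L) = pvARec s i (i + L) := by
  rw [pvDpStep]
  have hfold : (List.range' (i+1) (i + L - (i+1))).foldl
      (fun best k => max best (dp.getD (i, k) 0 + dp.getD (k, i + L) 0)) 0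
      = (List.range' (i+1) (i + L - (i+1))).foldl
      (fun best k => max best (pvARec s i k + pvARec s k (i + L))) 0 := by
    apply PySem.List.foldl_congr_mem
    intro acc k hk
    have hm := List.mem_range'_1.mp hk
    rw [hinv i k (by omega) (by omega), hinv k (i + L) (by omega) (by omega)]
  simp only [hfold]
  by_cases hc : L = 2
  · subst hc
    have h1 : pvARec s i (i+1) = 0 := by rw [pvARec, if_pos (by omega)]
    have h2 : pvARec s (i+1) (i+2) = 0 := by rw [pvARec, if_pos (by omega)]
    have h3 : dp.getD (i+1, i+2-1) 0 = pvARec s (i+1) (i+1) := hinv _ _ (by omega) (by omega)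
    have h4 : pvARec s (i+1) (i+1) = 0 := by rw [pvARec, if_pos (by omega)]
    rw [show i + 2 - (i+1) = 1 by omega]
    rw [show List.range' (i+1) 1 = [i+1] from rfl]
    simp only [List.foldl_cons, List.foldl_nil, h1, h2, h3, h4]
    rw [pvARec, if_neg (show ¬ (i + 2 > i + 2) by omega), if_pos (rfl : i + 2 = i + 2)]
    rw [← pvSlice_pair s i (by omega)]
    norm_num [pvMatchesAlt, pvMatches]
  · -- L ≥ 3
    have hL3 : 3 ≤ L := by omega
    conv_rhs => rw [pvARec]
    rw [if_neg (show ¬ (i + 2 > i + L) by omega), if_neg (show ¬ (i + 2 = i + L) by omega)]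
    rw [show pvMatchesAlt = pvMatches from rfl]
    rw [List.attach_map_val (f := fun k => pvARec s i k + pvARec s k (i + L))]
    obtain ⟨m', hm'⟩ : ∃ m', i + L - (i+1) = m' + 1 := ⟨L - 2, by omega⟩
    rw [hm', List.range'_succ, List.map_cons]
    simp only [List.foldl_cons]
    have hmax : max (0:Int) (pvARec s i (i+1) + pvARec s (i+1) (i + L))
        = pvARec s i (i+1) + pvARec s (i+1) (i + L) := max_eq_right (by
      have := pvARec_nonneg s i (i+1)
      have := pvARec_nonneg s (i+1) (i + L)
      omega)
    rw [hmax,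
      List.foldl_map (f := fun k => pvARec s i k + pvARec s k (i + L)) (g := max),
      hinv (i+1) (i + L - 1) (by omega) (by omega)]

theorem pvInner' (s : String) (L : Nat) (hL : 2 ≤ L) (hLn : L ≤ s.toList.length) :
    ∀ (cnt m : Nat) (dp : PySem.Dict (Nat × Nat) Int),
      (∀ a b : Nat, b ≤ s.toList.length → b - a ≤ L - 1 → dp.getD (a, b) 0 = pvARec s a b) →
      (∀ a : Nat, a < m → dp.getD (a, a + L) 0 = pvARec s a (a + L)) →
      m + cnt ≤ s.toList.length - L + 1 →
      (∀ a b : Nat, b ≤ s.toList.length → b - a ≤ L - 1 →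
        ((List.range' m cnt).foldl
          (fun dp i => dp.insert (i, i + L) (pvDpStep s dp i (i + L))) dp).getD (a, b) 0
          = pvARec s a b) ∧
      (∀ a : Nat, a < m + cnt →
        ((List.range' m cnt).foldl
          (fun dp i => dp.insert (i, i + L) (pvDpStep s dp i (i + L))) dp).getD (a, a + L) 0
          = pvARec s a (a + L)) := by
  intro cnt
  induction cnt with
  | zero =>
    intro m dp hinv hpre _
    exact ⟨hinv, fun a ha => hpre a (by omega)⟩
  | succ cnt ih =>
    intro m dp hinv hpre hcnt
    rw [List.range'_succ]
    simp only [List.foldl_cons]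
    have hmL : m + L ≤ s.toList.length := by omega
    have hstep : pvDpStep s dp m (m + L) = pvARec s m (m + L) :=
      pvStep_correct' s dp m L hL hmL hinv
    have hinv1 : ∀ a b : Nat, b ≤ s.toList.length → b - a ≤ L - 1 →
        ((dp.insert (m, m + L) (pvDpStep s dp m (m + L))).getD (a, b) 0) = pvARec s a b := by
      intro a b hb hba
      rw [PySem.Dict.getD_insert, if_neg (by
        intro hab
        have h1 : a = m := congrArg Prod.fst hab
        have h2 : b = m + L := congrArg Prod.snd hab
        omega)]
      exact hinv a b hb hba
    have hpre1 : ∀ a : Nat, a < m + 1 →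
        ((dp.insert (m, m + L) (pvDpStep s dp m (m + L))).getD (a, a + L) 0) = pvARec s a (a + L) := by
      intro a ha
      rw [PySem.Dict.getD_insert]
      by_cases ham : a = m
      · subst ham; rw [if_pos rfl, hstep]
      · rw [if_neg (by intro hab; exact ham (congrArg Prod.fst hab))]
        exact hpre a (by omega)
    have := ih (m + 1) _ hinv1 hpre1 (by omega)
    exact ⟨this.1, fun a ha => this.2 a (by omega)⟩

theorem pvOuter' (s : String) :
    ∀ (cnt c : Nat) (dp : PySem.Dict (Nat × Nat) Int),
      1 ≤ c → c + cnt ≤ s.toList.length →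
      (∀ a b : Nat, b ≤ s.toList.length → b - a ≤ c → dp.getD (a, b) 0 = pvARec s a b) →
      (∀ a b : Nat, b ≤ s.toList.length → b - a ≤ c + cnt →
        ((List.range' (c+1) cnt).foldl
          (fun dp len => (List.range' 0 (s.toList.length - len + 1)).foldl
            (fun dp i => dp.insert (i, i + len) (pvDpStep s dp i (i + len))) dp) dp).getD (a, b) 0
          = pvARec s a b) := by
  intro cnt
  induction cnt with
  | zero => intro c dp _ _ hinv; simpa using hinv
  | succ cnt ih =>
    intro c dp hc hcnt hinv
    rw [List.range'_succ]
    simp only [List.foldl_cons]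
    have h1 := pvInner' s (c+1) (by omega) (by omega)
      (s.toList.length - (c+1) + 1) 0 dp (by simpa using hinv) (by omega) (by omega)
    have hinv1 : ∀ a b : Nat, b ≤ s.toList.length → b - a ≤ c + 1 →
        ((List.range' 0 (s.toList.length - (c+1) + 1)).foldl
          (fun dp i => dp.insert (i, i + (c+1)) (pvDpStep s dp i (i + (c+1)))) dp).getD (a, b) 0
          = pvARec s a b := by
      intro a b hb hba
      by_cases hsm : b - a ≤ c
      · exact h1.1 a b hb (by omega)
      · have hba' : b = a + (c + 1) := by omega
        subst hba'
        exact h1.2 a (by omega)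
    have := ih (c+1) _ (by omega) (by omega) hinv1
    intro a b hb hba
    exact this a b hb (by omega)

-- ===== VERDICT (by name: the statement is the Claim_ definition above) =====
theorem find_maximum_regular_brackets_spec : Claim_equal_find_maximum_regular_brackets := by
  intro s _
  unfold Spec_find_maximum_regular_brackets
  simp only [find_maximum_regular_brackets, find_maximum_regular_brackets_alt]
  by_cases hn : s.toList.length ≤ 1
  · rw [show s.toList.length - 1 = 0 by omega]
    simp only [List.range'_zero, List.foldl_nil, PySem.Dict.getD_empty]
    rw [pvARec, if_pos (by omega)]
  · have h0 : ∀ a b : Nat, b ≤ s.toList.length → b - a ≤ 1 →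
        (PySem.Dict.empty : PySem.Dict (Nat × Nat) Int).getD (a, b) 0 = pvARec s a b := by
      intro a b _ hba
      rw [PySem.Dict.getD_empty, pvARec, if_pos (by omega)]
    have h := pvOuter' s (s.toList.length - 1) 1 PySem.Dict.empty le_rfl (by omega) h0
      0 s.toList.length le_rfl (by omega)
    exact h.symm
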